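-- pv_equiv track=rewrite | github.com/fllubber12/ygo-combo-pipeline | scripts/qa/suggest_card_tags.py | detect_primary_actions
-- ===== SOURCE A (Python) =====
-- def detect_primary_actions(text: str) -> list[str]:
--     lowered = text.lower()
--     actions = []
--
--     if "add 1" in lowered and "from your deck to your hand" in lowered:
--         actions.extend(["Search", "Add-to-hand"])
--     if "special summon" in lowered:
--         actions.append("Special Summon")
--     if "send" in lowered and "to the gy" in lowered:
--         actions.append("Send-to-GY")
--     if "draw" in lowered:
--         actions.append("Draw")
--     if "negate" in lowered:
--         actions.append("Negate")
--     if "destroy" in lowered: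
--         actions.append("Destroy")
--     if "banish" in lowered:
--         actions.append("Banish")
--     if "return" in lowered and "to the hand" in lowered:
--         actions.append("Bounce")
--
--     seen = set()
--     ordered = []
--     for action in actions:
--         if action not in seen:
--             seen.add(action)
--             ordered.append(action)
--     return ordered
-- ===== SOURCE B (Python) =====
-- NEEDLES = ["add 1", "from your deck to your hand", "special summon", "send",
--            "to the gy", "draw", "negate", "destroy", "banish", "return",
--            "to the hand"]
--
-- RULES = [
--     (["add 1", "from your deck to your hand"], ["Search", "Add-to-hand"]),
--     (["special summon"], ["Special Summon"]),
--     (["send", "to the gy"], ["Send-to-GY"]),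
--     (["draw"], ["Draw"]),
--     (["negate"], ["Negate"]),
--     (["destroy"], ["Destroy"]),
--     (["banish"], ["Banish"]),
--     (["return", "to the hand"], ["Bounce"]),
-- ]
--
--
-- def detect_primary_actions(text: str) -> list[str]:
--     # One positional scan over the text (naive multi-pattern matcher):
--     # at each index, record every needle that starts there; then emit
--     # tags for the rules whose needles were all seen.
--     lowered = text.lower()
--     matched = set()
--     for i in range(len(lowered)):
--         for n in NEEDLES:
--             if lowered.startswith(n, i):
--                 matched.add(n)
--     return [tag
--             for needles, tags in RULES
--             if all(n in matched for n in needles)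
--             for tag in tags]
-- ===== Notes on version B (the rewrite author's own statement) =====
-- stated objective: alternative
-- what changed: Replaces A's eight per-needle substring membership tests plus a seen-set dedup pass with a single positional scan of the lowered text (a naive multi-pattern matcher recording which needles start at each index) followed by a data-driven rules table mapping the matched needle set to tags; the dedup pass disappears since the emitted tags are distinct by construction; it trades CPython's fast built-in substring search for an explicit interpreter-level scan, so the constant factor is larger.
import Mathlib
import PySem

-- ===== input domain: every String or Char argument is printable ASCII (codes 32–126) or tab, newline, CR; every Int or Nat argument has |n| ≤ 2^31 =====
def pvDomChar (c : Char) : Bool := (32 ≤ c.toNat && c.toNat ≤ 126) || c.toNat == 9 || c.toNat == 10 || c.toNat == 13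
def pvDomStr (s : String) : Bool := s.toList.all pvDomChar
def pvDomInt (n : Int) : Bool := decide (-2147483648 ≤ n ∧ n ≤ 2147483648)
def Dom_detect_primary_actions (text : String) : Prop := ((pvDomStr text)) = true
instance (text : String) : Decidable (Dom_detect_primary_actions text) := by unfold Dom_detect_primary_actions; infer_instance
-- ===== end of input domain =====

-- B replaces A's per-needle substring checks and seen-set dedup with one positional
-- scan collecting matched needles, then a data-driven rules table (alternative; same cost).

-- ===== PORT A =====
def detect_primary_actions (text : String) : List String :=
  let lowered := PySem.Str.lower text
  let actions : List String := []
  let actions := if PySem.Str.isIn "add 1" lowered && PySem.Str.isIn "from your deck to your hand" lowered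
                 then actions ++ ["Search", "Add-to-hand"] else actions
  let actions := if PySem.Str.isIn "special summon" lowered then actions ++ ["Special Summon"] else actions
  let actions := if PySem.Str.isIn "send" lowered && PySem.Str.isIn "to the gy" lowered
                 then actions ++ ["Send-to-GY"] else actions
  let actions := if PySem.Str.isIn "draw" lowered then actions ++ ["Draw"] else actions
  let actions := if PySem.Str.isIn "negate" lowered then actions ++ ["Negate"] else actions
  let actions := if PySem.Str.isIn "destroy" lowered then actions ++ ["Destroy"] else actions
  let actions := if PySem.Str.isIn "banish" lowered then actions ++ ["Banish"] else actions
  let actions := if PySem.Str.isIn "return" lowered && PySem.Str.isIn "to the hand" lowered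
                 then actions ++ ["Bounce"] else actions
  let st := actions.foldl
    (fun (st : PySem.Set String × List String) action =>
      if !(PySem.Set.contains st.1 action)
      then (PySem.Set.add st.1 action, st.2 ++ [action])
      else st)
    (PySem.Set.empty, [])
  st.2

-- ===== PORT B =====
def pvNeedles : List String :=
  ["add 1", "from your deck to your hand", "special summon", "send",
   "to the gy", "draw", "negate", "destroy", "banish", "return", "to the hand"]

def pvRules : List (List String × List String) :=
  [ (["add 1", "from your deck to your hand"], ["Search", "Add-to-hand"]),
    (["special summon"], ["Special Summon"]),
    (["send", "to the gy"], ["Send-to-GY"]),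
    (["draw"], ["Draw"]),
    (["negate"], ["Negate"]),
    (["destroy"], ["Destroy"]),
    (["banish"], ["Banish"]),
    (["return", "to the hand"], ["Bounce"]) ]

-- the positional scan: at each position (suffix) add every needle that starts there
-- (lowered.startswith(n, i) is exactly 'n.toList <+: lowered.toList.drop i')
def pvScan : List Char → PySem.Set String → PySem.Set String
  | [], m => m
  | c :: rest, m =>
      pvScan rest
        (pvNeedles.foldl
          (fun m n => if n.toList <+: (c :: rest) then PySem.Set.add m n else m) m)

def detect_primary_actions_alt (text : String) : List String :=
  let lowered := PySem.Str.lower text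
  let matched := pvScan lowered.toList PySem.Set.empty
  pvRules.flatMap
    (fun r => if r.1.all (fun n => PySem.Set.contains matched n) then r.2 else [])

-- ===== PRECONDITION & SPEC =====
def Spec_detect_primary_actions (text : String) (out : List String) : Prop := out = detect_primary_actions_alt text
instance (text : String) (out : List String) : Decidable (Spec_detect_primary_actions text out) := by unfold Spec_detect_primary_actions; infer_instance

-- ===== CLAIM =====
def Claim_equal_detect_primary_actions : Prop := ∀ (text : String), Dom_detect_primary_actions text → Spec_detect_primary_actions text (detect_primary_actions text)

-- ===== LEMMAS AND PROOFS =====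

theorem if_app (c : Prop) [Decidable c] (acc t : List String) :
    (if c then acc ++ t else acc) = acc ++ (if c then t else []) := by
  split <;> simp

theorem ite_sublist (c : Prop) [Decidable c] (t : List String) :
    (if c then t else []).Sublist t := by
  split <;> simp

-- A's seen/ordered loop computes PySem.Set.ofList (the invariant seen = ordered is preserved)
theorem loop_eq (xs : List String) (s : List String) :
    (xs.foldl
      (fun (st : PySem.Set String × List String) action =>
        if !(PySem.Set.contains st.1 action)
        then (PySem.Set.add st.1 action, st.2 ++ [action])
        else st)
      (s, s)).2 = xs.foldl PySem.Set.add s := by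
  induction xs generalizing s with
  | nil => rfl
  | cons a xs ih =>
    rw [List.foldl_cons, List.foldl_cons]
    by_cases h : PySem.Set.contains s a = true
    · rw [if_neg (by rw [h]; decide),
          show PySem.Set.add s a = s from by unfold PySem.Set.add; rw [h]; rfl]
      exact ih s
    · have hf : PySem.Set.contains s a = false := by
        revert h; cases PySem.Set.contains s a <;> simp
      rw [if_pos (by rw [hf]; decide),
          show PySem.Set.add s a = s ++ [a] from by unfold PySem.Set.add; rw [hf]; rfl]
      exact ih (s ++ [a])

-- A equals the rules-table form with plain substring tests
theorem A_eq (text : String) :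
    detect_primary_actions text =
      pvRules.flatMap
        (fun r => if r.1.all (fun n => PySem.Str.isIn n (PySem.Str.lower text)) then r.2 else []) := by
  unfold detect_primary_actions pvRules
  simp only [if_app]
  simp only [List.nil_append, List.append_assoc]
  rw [show (PySem.Set.empty : PySem.Set String) = [] from rfl, loop_eq,
      ← PySem.Set.ofList_eq_foldl]
  rw [PySem.Set.ofList_eq_self_of_nodup]
  · simp [List.flatMap]
  · refine List.Sublist.nodup
      ((ite_sublist _ _).append ((ite_sublist _ _).append ((ite_sublist _ _).append
        ((ite_sublist _ _).append ((ite_sublist _ _).append ((ite_sublist _ _).append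
        ((ite_sublist _ _).append (ite_sublist _ _)))))))) (by decide)

-- membership after the inner fold over the needle list
theorem mem_inner (l : List String) (s : List Char) (m : PySem.Set String) (x : String) :
    x ∈ l.foldl (fun m n => if n.toList <+: s then PySem.Set.add m n else m) m ↔
      x ∈ m ∨ (x ∈ l ∧ x.toList <+: s) := by
  induction l generalizing m with
  | nil => simp
  | cons a l ih =>
    rw [List.foldl_cons, ih]
    by_cases h : a.toList <+: s
    · rw [if_pos h, PySem.Set.mem_add]
      constructor
      · rintro ((hm | rfl) | ⟨hl, hp⟩)
        · exact Or.inl hm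
        · exact Or.inr ⟨List.mem_cons_self .., h⟩
        · exact Or.inr ⟨List.mem_cons_of_mem _ hl, hp⟩
      · rintro (hm | ⟨hl, hp⟩)
        · exact Or.inl (Or.inl hm)
        · rcases List.mem_cons.mp hl with rfl | hl
          · exact Or.inl (Or.inr rfl)
          · exact Or.inr ⟨hl, hp⟩
    · rw [if_neg h]
      constructor
      · rintro (hm | ⟨hl, hp⟩)
        · exact Or.inl hm
        · exact Or.inr ⟨List.mem_cons_of_mem _ hl, hp⟩
      · rintro (hm | ⟨hl, hp⟩)
        · exact Or.inl hm
        · rcases List.mem_cons.mp hl with rfl | hl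
          · exact absurd hp h
          · exact Or.inr ⟨hl, hp⟩

-- membership after the whole scan: matched exactly when some scanned suffix starts with x
theorem mem_scan (s : List Char) (m : PySem.Set String) (x : String) :
    x ∈ pvScan s m ↔
      x ∈ m ∨ (x ∈ pvNeedles ∧ ∃ j < s.length, x.toList <+: s.drop j) := by
  induction s generalizing m with
  | nil => simp [pvScan]
  | cons c rest ih =>
    rw [pvScan, ih, mem_inner]
    constructor
    · rintro ((hm | ⟨hn, hp⟩) | ⟨hn, j, hj, hp⟩)
      · exact Or.inl hm
      · exact Or.inr ⟨hn, 0, by simp, hp⟩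
      · exact Or.inr ⟨hn, j + 1, by simpa using hj, by simpa using hp⟩
    · rintro (hm | ⟨hn, j, hj, hp⟩)
      · exact Or.inl (Or.inl hm)
      · cases j with
        | zero => exact Or.inl (Or.inr ⟨hn, by simpa using hp⟩)
        | succ j =>
          exact Or.inr ⟨hn, j, by simpa using hj, by simpa using hp⟩

-- for a nonempty needle in the table, the scan's verdict is Python's 'n in lowered'
theorem cond_eq (s : List Char) (x : String) (hx : x ∈ pvNeedles) (hne : x.toList ≠ []) :
    PySem.Set.contains (pvScan s PySem.Set.empty) x = PySem.Chars.isIn x.toList s := by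
  rcases hb : PySem.Chars.isIn x.toList s with _ | _
  · have hno : ¬ x.toList <:+: s := (PySem.Chars.isIn_eq_false_iff _ _).mp hb
    rw [Bool.eq_false_iff]
    intro hc
    rcases (mem_scan s PySem.Set.empty x).mp ((PySem.Set.contains_iff _ _).mp hc) with hm | ⟨_, j, _, hp⟩
    · simp [PySem.Set.empty] at hm
    · exact hno ((PySem.Chars.isIn_iff_infix _ _).mp ((PySem.Chars.exists_prefix_drop_iff_isIn _ _).mp ⟨j, hp⟩))
  · obtain ⟨j, hp⟩ := (PySem.Chars.exists_prefix_drop_iff_isIn _ _).mpr hb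
    have hj : j < s.length := by
      by_contra hge
      rw [List.drop_eq_nil_of_le (by omega)] at hp
      exact hne (List.prefix_nil.mp hp)
    exact (PySem.Set.contains_iff _ _).mpr
      ((mem_scan s PySem.Set.empty x).mpr (Or.inr ⟨hx, j, hj, hp⟩))

theorem detect_agree (text : String) :
    detect_primary_actions text = detect_primary_actions_alt text := by
  rw [A_eq]
  unfold detect_primary_actions_alt
  have h : ∀ x ∈ pvNeedles,
      PySem.Set.contains (pvScan (PySem.Str.lower text).toList PySem.Set.empty) x
        = PySem.Str.isIn x (PySem.Str.lower text) := by
    intro x hx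
    rw [cond_eq _ x hx (by fin_cases hx <;> decide)]
    rfl
  simp only [pvRules, List.flatMap_cons, List.flatMap_nil, List.append_nil, List.all_cons,
    List.all_nil, Bool.and_true]
  rw [h "add 1" (by decide), h "from your deck to your hand" (by decide),
      h "special summon" (by decide), h "send" (by decide), h "to the gy" (by decide),
      h "draw" (by decide), h "negate" (by decide), h "destroy" (by decide),
      h "banish" (by decide), h "return" (by decide), h "to the hand" (by decide)]

-- ===== VERDICT =====
theorem detect_primary_actions_spec : Claim_equal_detect_primary_actions := by
  intro text _
  exact detect_agree text
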